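-- pv_equiv track=rewrite | github.com/linhdvu14/cp-sols | sols/Meta/HackerCup/2021/2021_1/A2_Weak_Typing_Chapter_2.py | solve
-- ===== SOURCE A (Python) =====
-- MOD = 10**9 + 7
--
-- def solve(s, n):
-- 	res = 0
-- 	key, i = '', -1
-- 	for j, c in enumerate(s):
-- 		if c == 'F': continue
-- 		if c != key and key != '':
-- 			res += (i+1)*(n-j)
-- 			res = res % MOD
-- 		key = c
-- 		i = j
-- 	return res
-- ===== SOURCE B (Python) =====
-- MOD = 10**9 + 7
--
-- def solve(s, n):
--     # run-length encode the non-'F' characters as (char, first index, last index),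
--     # then sum one contribution per adjacent pair of runs.
--     pts = [(j, c) for j, c in enumerate(s) if c != 'F']
--     runs = []
--     k = 0
--     while k < len(pts):
--         start = k
--         while k + 1 < len(pts) and pts[k + 1][1] == pts[start][1]:
--             k += 1
--         runs.append((pts[start][1], pts[start][0], pts[k][0]))
--         k += 1
--     total = sum((last + 1) * (n - first)
--                 for (_, _, last), (_, first, _) in zip(runs, runs[1:]))
--     return total % MOD
-- ===== Notes on version B (the rewrite author's own statement) =====
-- stated objective: alternative
-- what changed: A does one stateful scan carrying the last non-'F' char/index and reduces mod after every addition; B first run-length encodes the non-'F' positions into maximal runs (char, first, last) and then sums exactly one contribution (last_prev+1)*(n-first_next) per adjacent pair of runs, taking the modulus once at the end.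
import Mathlib
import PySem

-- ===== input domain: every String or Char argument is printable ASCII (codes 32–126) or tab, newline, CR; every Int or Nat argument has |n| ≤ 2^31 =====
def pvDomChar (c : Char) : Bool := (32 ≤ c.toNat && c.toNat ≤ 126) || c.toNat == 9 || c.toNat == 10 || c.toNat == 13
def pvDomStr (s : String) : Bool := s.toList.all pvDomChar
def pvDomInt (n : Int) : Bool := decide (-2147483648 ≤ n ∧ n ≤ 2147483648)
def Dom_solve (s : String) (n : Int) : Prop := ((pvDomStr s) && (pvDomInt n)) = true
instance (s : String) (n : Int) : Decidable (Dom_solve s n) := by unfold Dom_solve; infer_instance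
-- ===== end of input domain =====

-- B run-length encodes the non-'F' positions into maximal runs (char, first, last) and sums
-- one contribution per adjacent pair of runs, reducing mod 10^9+7 once at the end, instead of
-- A's stateful per-character scan that reduces after every addition.

-- ===== PORT A =====
-- A's for-loop over enumerate(s) as structural recursion over the same state (res, key, i);
-- the '' sentinel for key is ported as 'none' (no single char compares equal to '').
def solveLoopA (n : Int) : List (Int × Char) → Int → Option Char → Int → Int
  | [], res, _, _ => res
  | (j, c) :: rest, res, key, i =>
    if c = 'F' then solveLoopA n rest res key i
    else
      let res' := if some c ≠ key ∧ key ≠ none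
                  then PySem.Int.mod (res + (i + 1) * (n - j)) (10 ^ 9 + 7)
                  else res
      solveLoopA n rest res' (some c) j

def solve (s : String) (n : Int) : Int :=
  solveLoopA n (PySem.List.enumerate s.toList) 0 none (-1)

-- ===== PORT B =====
-- B's outer while-loop over pts: each iteration takes one maximal run of equal chars (the inner
-- while 'pts[k+1][1] == pts[start][1]' = takeWhile/dropWhile over the suffix, exact) and emits
-- (char, first index, last index).
def runsLoopB : List (Int × Char) → List (Char × Int × Int)
  | [] => []
  | (j, c) :: rest =>
    let same := rest.takeWhile (fun p => p.2 == c)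
    let rest' := rest.dropWhile (fun p => p.2 == c)
    (c, j, (same.getLastD (j, c)).1) :: runsLoopB rest'
termination_by pts => pts.length
decreasing_by
  simpa using Nat.lt_succ_of_le (List.length_dropWhile_le _ _)

def solve_alt (s : String) (n : Int) : Int :=
  let pts := (PySem.List.enumerate s.toList).filter (fun jc => jc.2 ≠ 'F')
  let runs := runsLoopB pts
  -- sum over zip(runs, runs[1:]); runs[1:] on a list is its tail (exact)
  let total := (runs.zip runs.tail).foldl
      (fun t p => t + (p.1.2.2 + 1) * (n - p.2.2.1)) 0
  PySem.Int.mod total (10 ^ 9 + 7)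

-- ===== PRECONDITION & SPEC =====
def Spec_solve (s : String) (n : Int) (out : Int) : Prop := out = solve_alt s n
instance (s : String) (n : Int) (out : Int) : Decidable (Spec_solve s n out) := by unfold Spec_solve; infer_instance

-- ===== CLAIM (what is proved, stated in full; the proofs are below) =====
def Claim_equal_solve : Prop := ∀ (s : String) (n : Int), Dom_solve s n → Spec_solve s n (solve s n)

-- ===== LEMMAS AND PROOFS =====

-- the un-modded sum of A's contributions over consecutive elements of the filtered list
def pairSum (n : Int) : List (Int × Char) → Int
  | (i, k) :: (j, c) :: rest =>
      (if c ≠ k then (i + 1) * (n - j) else 0) + pairSum n ((j, c) :: rest)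
  | _ => 0

-- the sum of B's contributions over consecutive runs
def runSum (n : Int) : List (Char × Int × Int) → Int
  | (_, _, l) :: (c2, f2, l2) :: rs => (l + 1) * (n - f2) + runSum n ((c2, f2, l2) :: rs)
  | _ => 0

theorem loopA_eq (n : Int) (l : List (Int × Char)) :
    ∀ (res : Int) (k : Char) (i : Int), res % (10 ^ 9 + 7) = res →
      solveLoopA n l res (some k) i
        = (res + pairSum n ((i, k) :: l.filter (fun jc => jc.2 ≠ 'F'))) % (10 ^ 9 + 7) := by
  induction l with
  | nil =>
      intro res k i hres
      simp only [solveLoopA, List.filter_nil, pairSum, add_zero]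
      norm_num at hres ⊢
      exact hres.symm
  | cons jc rest ih =>
      intro res k i hres
      rcases jc with ⟨j, c⟩
      by_cases hF : c = 'F'
      · simp only [solveLoopA, hF, List.filter_cons]
        simpa [hF] using ih res k i hres
      · have hfil : List.filter (fun jc => decide (jc.2 ≠ 'F')) ((j, c) :: rest)
            = (j, c) :: List.filter (fun jc => decide (jc.2 ≠ 'F')) rest := by simp [hF]
        simp only [solveLoopA, if_neg hF, hfil]
        by_cases hck : c = k
        · rw [if_neg (by simp [hck]), ih res c j hres]
          simp [pairSum, hck]
        · rw [if_pos ⟨by simp [hck], by simp⟩,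
              PySem.Int.mod_eq_emod_of_pos (by norm_num)]
          have h2 : ((res + (i + 1) * (n - j)) % (10 ^ 9 + 7)) % (10 ^ 9 + 7)
              = (res + (i + 1) * (n - j)) % (10 ^ 9 + 7) :=
            Int.emod_emod_of_dvd _ dvd_rfl
          rw [ih _ c j h2]
          simp only [pairSum, if_pos (show c ≠ k from hck)]
          rw [Int.emod_add_emod, add_assoc]

theorem loopA_init (n : Int) (l : List (Int × Char)) :
    solveLoopA n l 0 none (-1)
      = pairSum n (l.filter (fun jc => jc.2 ≠ 'F')) % (10 ^ 9 + 7) := by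
  induction l with
  | nil => simp [solveLoopA, pairSum]
  | cons jc rest ih =>
      rcases jc with ⟨j, c⟩
      by_cases hF : c = 'F'
      · simpa [solveLoopA, hF, List.filter_cons] using ih
      · have hfil : List.filter (fun jc => decide (jc.2 ≠ 'F')) ((j, c) :: rest)
            = (j, c) :: List.filter (fun jc => decide (jc.2 ≠ 'F')) rest := by simp [hF]
        simp only [solveLoopA, if_neg hF, hfil]
        rw [if_neg (by simp), loopA_eq n rest 0 c j (by norm_num), zero_add]

-- B's zip-fold computes runSum
theorem foldZip_eq_runSum (n : Int) (runs : List (Char × Int × Int)) :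
    (runs.zip runs.tail).foldl (fun t p => t + (p.1.2.2 + 1) * (n - p.2.2.1)) 0
      = runSum n runs := by
  cases runs with
  | nil => simp [runSum]
  | cons x l =>
      rw [List.tail_cons]
      suffices h : ∀ (x : Char × Int × Int) (r : Int),
          ((x :: l).zip l).foldl (fun t p => t + (p.1.2.2 + 1) * (n - p.2.2.1)) r
            = r + runSum n (x :: l) by
        simpa using h x 0
      induction l with
      | nil => intro x r; simp [runSum]
      | cons y t ih =>
          intro x r
          simp only [List.zip_cons_cons, List.foldl_cons]
          rw [ih y]
          rcases x with ⟨c1, f1, l1⟩; rcases y with ⟨c2, f2, l2⟩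
          simp [runSum]; ring

-- pairSum over one maximal run: equal chars contribute nothing internally, only the boundary
theorem dropWhile_head_false {a : Type} (p : a -> Bool) :
    forall (l : List a) (x : a) (t : List a), l.dropWhile p = x :: t -> p x = false := by
  intro l
  induction l with
  | nil => intro x t h; simp [List.dropWhile] at h
  | cons b l ih =>
      intro x t h
      by_cases hp : p b = true
      . rw [List.dropWhile_cons_of_pos hp] at h; exact ih x t h
      . rw [List.dropWhile_cons_of_neg hp] at h
        cases h; simpa using hp

theorem pairSum_run (n : Int) (c : Char) (rest' : List (Int × Char)) :
    forall (same : List (Int × Char)), (forall x, x ∈ same -> x.2 = c) -> forall j : Int,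
      pairSum n ((j, c) :: (same ++ rest')) =
        (match rest' with
         | (f, c') :: _ => if c' ≠ c then ((same.getLastD (j, c)).1 + 1) * (n - f) else 0
         | [] => 0) + pairSum n rest' := by
  intro same
  induction same with
  | nil =>
      intro _ j
      cases rest' with
      | nil => simp [pairSum]
      | cons fc t => rcases fc with ⟨f, c'⟩; simp [pairSum]
  | cons x same' ih =>
      intro hmem j
      rcases x with ⟨j2, c2⟩
      have hc2 : c2 = c := hmem (j2, c2) (List.mem_cons_self ..)
      subst hc2
      simp only [List.cons_append]
      rw [show pairSum n ((j, c2) :: (j2, c2) :: (same' ++ rest'))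
            = pairSum n ((j2, c2) :: (same' ++ rest')) from by simp [pairSum]]
      rw [ih (fun x hx => hmem x (List.mem_cons_of_mem _ hx)) j2, List.getLastD_cons]

-- the run decomposition computes the same un-modded total as A's pairSum
theorem runSum_runsLoop (n : Int) : forall pts : List (Int × Char),
    runSum n (runsLoopB pts) = pairSum n pts := by
  intro pts
  induction pts using runsLoopB.induct with
  | case1 => simp [runsLoopB, runSum, pairSum]
  | case2 j c rest rest' ih =>
      have hdef : rest' = rest.dropWhile (fun p => p.2 == c) := rfl
      rw [hdef] at ih
      have hsplit : rest = rest.takeWhile (fun p => p.2 == c) ++ rest.dropWhile (fun p => p.2 == c) :=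
        List.takeWhile_append_dropWhile.symm
      have hmem : forall x, x ∈ rest.takeWhile (fun p => p.2 == c) -> x.2 = c := by
        intro x hx
        simpa using List.mem_takeWhile_imp hx
      rw [runsLoopB]
      cases hrest' : rest.dropWhile (fun p => p.2 == c) with
      | nil =>
          conv_rhs => rw [hsplit, hrest']
          rw [pairSum_run n c [] _ hmem j]
          simp [runsLoopB, runSum, pairSum]
      | cons fc t =>
          rcases fc with ⟨f, c'⟩
          have hne : c' ≠ c := by
            have := dropWhile_head_false _ rest _ _ hrest'
            simpa using this
          conv_rhs => rw [hsplit, hrest']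
          rw [pairSum_run n c ((f, c') :: t) _ hmem j]
          rw [hrest'] at ih
          rw [show runsLoopB ((f, c') :: t)
                = (c', f, ((t.takeWhile (fun p => p.2 == c')).getLastD (f, c')).1)
                    :: runsLoopB (t.dropWhile (fun p => p.2 == c')) from by rw [runsLoopB]]
              at ih ⊢
          simp only [runSum, if_pos hne]
          rw [ih]

-- ===== VERDICT (by name: the statement is the Claim_ definition above) =====
theorem solve_spec : Claim_equal_solve := by
  intro s n _
  unfold Spec_solve solve solve_alt
  dsimp only
  rw [loopA_init, foldZip_eq_runSum, runSum_runsLoop,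
      PySem.Int.mod_eq_emod_of_pos (by norm_num)]
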